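-- pv_equiv track=rewrite | github.com/Nnigmat/ir_lab4 | engine/wildcard.py | word_to_bigrams
-- ===== SOURCE A (Python) =====
-- def word_to_bigrams(word, begining=True, ending=True):
--     res = []
--
--     # If we got the begining of the word start with '$'
--     tmp = '$' if begining else ''
--
--     # Split word into bigrams
--     for char in word:
--         tmp = tmp + char
--         if len(tmp) == 2:
--             res.append(tmp)
--         tmp = char
--
--     # If we got the ending of the word add '$' to the end
--     if ending:
--         # Add the last character folowing by '$'
--         res.append(tmp + '$')
--
--     return res
-- ===== SOURCE B (Python) =====
-- def word_to_bigrams(word, begining=True, ending=True):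
--     s = ('$' if begining else '') + word
--     res = [a + b for a, b in zip(s, s[1:])]
--     if ending:
--         res.append((word[-1] if word else s) + '$')
--     return res
-- ===== Notes on version B (the rewrite author's own statement) =====
-- stated objective: simpler
-- what changed: B builds the bordered string once and extracts all bigrams with a single zip of the string against its own tail, instead of threading a two-character accumulator through a loop with a length test; the ending token is computed directly from the last character.
import Mathlib
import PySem

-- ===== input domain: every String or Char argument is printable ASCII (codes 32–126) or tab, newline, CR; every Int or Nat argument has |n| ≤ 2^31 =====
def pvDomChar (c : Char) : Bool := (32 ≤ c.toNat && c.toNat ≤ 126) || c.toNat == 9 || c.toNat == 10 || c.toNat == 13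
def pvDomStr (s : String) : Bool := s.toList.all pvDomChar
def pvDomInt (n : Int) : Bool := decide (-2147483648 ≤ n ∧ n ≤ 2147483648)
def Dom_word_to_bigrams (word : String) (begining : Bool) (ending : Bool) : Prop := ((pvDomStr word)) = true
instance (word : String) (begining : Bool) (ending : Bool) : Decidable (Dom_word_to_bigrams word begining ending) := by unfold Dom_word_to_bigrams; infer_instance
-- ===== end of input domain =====

-- B builds the bordered string first and extracts bigrams with one zip over it,
-- instead of threading a two-char accumulator through a loop (objective: simpler).

-- ===== PORT A =====
-- for char in word: tmp = tmp + char; if len(tmp) == 2: res.append(tmp); tmp = char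
def pvALoop : List Char → List Char → List (List Char) → List Char × List (List Char)
  | [], tmp, res => (tmp, res)
  | c :: cs, tmp, res =>
      let tmp2 := tmp ++ [c]
      let res2 := if tmp2.length = 2 then res ++ [tmp2] else res
      pvALoop cs [c] res2

def word_to_bigrams (word : String) (begining : Bool) (ending : Bool) : List String :=
  let tmp0 : List Char := if begining then ['$'] else []
  let p := pvALoop word.toList tmp0 []
  let out := if ending then p.2 ++ [p.1 ++ ['$']] else p.2
  out.map String.mk

-- ===== PORT B =====
def word_to_bigrams_alt (word : String) (begining : Bool) (ending : Bool) : List String :=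
  let s : List Char := (if begining then ['$'] else []) ++ word.toList
  let res := (s.zip s.tail).map (fun p => [p.1, p.2])
  let res := if ending then
      res ++ [(match word.toList.getLast? with | some c => [c] | none => s) ++ ['$']]
    else res
  res.map String.mk

-- ===== PRECONDITION & SPEC =====
def Spec_word_to_bigrams (word : String) (begining : Bool) (ending : Bool) (out : List String) : Prop := out = word_to_bigrams_alt word begining ending
instance (word : String) (begining : Bool) (ending : Bool) (out : List String) : Decidable (Spec_word_to_bigrams word begining ending out) := by unfold Spec_word_to_bigrams; infer_instance

-- ===== CLAIM (what is proved, stated in full; the proofs are below) =====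
def Claim_equal_word_to_bigrams : Prop := ∀ (word : String) (begining : Bool) (ending : Bool), Dom_word_to_bigrams word begining ending → Spec_word_to_bigrams word begining ending (word_to_bigrams word begining ending)

-- ===== LEMMAS AND PROOFS =====

-- sliding-window bigrams of a char list
def pvWin : List Char → List (List Char)
  | a :: b :: rest => [a, b] :: pvWin (b :: rest)
  | _ => []

theorem pvZip_eq_win (s : List Char) :
    (s.zip s.tail).map (fun p => [p.1, p.2]) = pvWin s := by
  induction s with
  | nil => rfl
  | cons a t ih =>
    cases t with
    | nil => rfl
    | cons b r =>
      simp only [List.tail_cons, List.zip_cons_cons, List.map_cons, pvWin]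
      have := ih
      simp only [List.tail_cons] at this
      rw [this]

theorem pvALoop_char (cs : List Char) :
    ∀ (tmp : List Char) (res : List (List Char)), tmp.length ≤ 1 →
    pvALoop cs tmp res =
      ((match cs.getLast? with | some c => [c] | none => tmp),
       res ++ pvWin (tmp ++ cs)) := by
  induction cs with
  | nil =>
    intro tmp res h
    match tmp, h with
    | [], _ => simp [pvALoop, pvWin]
    | [a], _ => simp [pvALoop, pvWin]
  | cons c cs ih =>
    intro tmp res h
    match tmp, h with
    | [], _ =>
      simp only [pvALoop]
      norm_num
      rw [ih [c] res (by simp)]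
      cases cs <;> simp [pvWin, List.getLast?_cons]
    | [a], _ =>
      simp only [pvALoop]
      norm_num
      rw [ih [c] (res ++ [[a, c]]) (by simp)]
      cases cs <;> simp [pvWin, List.getLast?_cons]

-- ===== VERDICT (by name: the statement is the Claim_ definition above) =====
theorem word_to_bigrams_spec : Claim_equal_word_to_bigrams := by
  intro word begining ending _
  show word_to_bigrams word begining ending = word_to_bigrams_alt word begining ending
  dsimp only [word_to_bigrams, word_to_bigrams_alt]
  rw [pvZip_eq_win]
  rw [pvALoop_char word.toList (if begining then ['$'] else []) []
    (by cases begining <;> simp)]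
  cases h : word.toList.getLast? with
  | none =>
    have hw : word.toList = [] := List.getLast?_eq_none_iff.mp h
    cases ending <;> simp [hw]
  | some c =>
    cases ending <;> simp
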